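-- pv_equiv track=rewrite | github.com/caelanjmiller/Genomics-Lab-BIO5488 | assignment2/fastq-parser.py | count_dinucleotides
-- ===== SOURCE A (Python) =====
-- from collections import Counter
--
-- def count_dinucleotides(fastq: dict) -> dict:
--     """Counts dinucleotides & returns a dict of counts"""
--     dinucleotides: list = []
--     for read in fastq.values():
--         for sequence in read.keys():
--             for nucleotide_index in range(len(sequence) - 1):
--                 dinucleotide_slice: str = "".join(
--                     sequence[nucleotide_index : (nucleotide_index + 2)]
--                 )
--                 dinucleotides.append(dinucleotide_slice)
--     dinucleotide_count: dict = dict(Counter(dinucleotides))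
--     # Filter out non-canonical nucleotides from dinucleotide counts by iterating over list of dinucleotide keys ('AT', 'GC', etc) and removing them from dinucleotide count dictionary
--     non_canonical_nucleotides: list = [
--         "Y",
--         "N",
--         "W",
--         "R",
--         "B",
--         "H",
--         "V",
--         "S",
--         "K",
--         "D",
--         "M",
--         "U",
--     ]
--     for dinucleotide in list(dinucleotide_count.keys()):
--         if any(nucleotide in dinucleotide for nucleotide in non_canonical_nucleotides):
--             del dinucleotide_count[dinucleotide]
--     return dict(sorted(dinucleotide_count.items()))
-- ===== SOURCE B (Python) =====
-- def count_dinucleotides(fastq: dict) -> dict: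
--     """Counts dinucleotides & returns a dict of counts"""
--     BAD = "YNWRBHVSKDMU"
--     dinucleotides = sorted(
--         seq[i:i + 2]
--         for read in fastq.values()
--         for seq in read.keys()
--         for i in range(len(seq) - 1)
--     )
--     # group consecutive equal elements of the sorted list: each maximal run is
--     # one key, its length is the count, and keys come out already sorted
--     result: dict = {}
--     i, n = 0, len(dinucleotides)
--     while i < n:
--         key = dinucleotides[i]
--         j = i + 1
--         while j < n and dinucleotides[j] == key:
--             j += 1
--         if all(c not in BAD for c in key):
--             result[key] = j - i
--         i = j
--     return result
-- ===== Notes on version B (the rewrite author's own statement) =====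
-- stated objective: alternative
-- what changed: B sorts the raw dinucleotide list once and then produces the counts by a run-length (groupby-style) scan over the sorted list with two indices, so no counting dictionary is ever maintained: Counter, the key-deletion loop and the final sorted() of A all disappear, and each count is the length of a maximal run.
import Mathlib
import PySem

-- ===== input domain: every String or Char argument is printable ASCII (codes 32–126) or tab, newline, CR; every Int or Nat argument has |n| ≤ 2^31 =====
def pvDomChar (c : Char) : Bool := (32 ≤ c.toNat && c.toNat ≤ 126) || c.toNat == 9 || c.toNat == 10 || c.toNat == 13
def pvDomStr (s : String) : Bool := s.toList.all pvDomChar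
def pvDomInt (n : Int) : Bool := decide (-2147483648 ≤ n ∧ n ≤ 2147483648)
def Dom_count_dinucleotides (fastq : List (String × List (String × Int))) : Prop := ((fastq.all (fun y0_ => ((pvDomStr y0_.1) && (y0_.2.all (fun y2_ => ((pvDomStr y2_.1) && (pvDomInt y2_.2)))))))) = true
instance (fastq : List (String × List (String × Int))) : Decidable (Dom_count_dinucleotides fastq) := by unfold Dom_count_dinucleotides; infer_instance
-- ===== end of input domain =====

-- B sorts the raw dinucleotide list once and produces the counts by a run-length (groupby-style)
-- scan over the sorted list, so no counting dictionary is maintained at all: Counter, the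
-- key-deletion loop and the final sorted() disappear ("alternative"; similar cost).

-- ===== PORT A =====
-- '"".join(sequence[i:i+2])' joins the characters of the 2-character slice, i.e. it IS the
-- slice itself as a string; ported as String.ofList of the PySem slice of the char list (exact).
def count_dinucleotides (fastq : List (String × List (String × Int))) : List (String × Int) :=
  let dinucleotides : List String :=
    (PySem.Dict.ofList fastq).values.foldl (fun acc read =>
      (PySem.Dict.ofList read).keys.foldl (fun acc sequence =>
        (PySem.List.pyRange 0 (PySem.Str.len sequence - 1) 1).foldl (fun acc i =>
          acc ++ [String.ofList (PySem.List.slice sequence.toList (some i) (some (i + 2)))]) acc) acc) []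
  let dinucleotide_count : PySem.Dict String Int := PySem.Dict.counter dinucleotides
  let non_canonical_nucleotides : List String := ["Y","N","W","R","B","H","V","S","K","D","M","U"]
  let filtered : PySem.Dict String Int :=
    dinucleotide_count.keys.foldl (fun c k =>
      if non_canonical_nucleotides.any (fun n => PySem.Str.isIn n k) then c.erase k else c)
      dinucleotide_count
  (PySem.Dict.ofList (PySem.List.sorted2 filtered.items (fun p => p.1) (fun p => p.2))).items

-- ===== PORT B =====
-- Source B's outer while loop over the sorted list is the structural recursion below: the inner
-- 'while j < n and dinucleotides[j] == key: j += 1' advance is takeWhile/dropWhile at the run's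
-- start, and 'j - i' is 1 + the length of the advanced run; 'result[key] = ...' on fresh keys in
-- emission order is appending the pair ('c not in BAD' for a 1-char c is Str.isIn; both exact).
def pvGroup : List String → List (String × Int)
  | [] => []
  | key :: rest =>
      (if key.toList.all (fun c => !(PySem.Str.isIn (String.ofList [c]) "YNWRBHVSKDMU"))
        then [(key, 1 + ((rest.takeWhile (fun y => y == key)).length : Int))] else [])
      ++ pvGroup (rest.dropWhile (fun y => y == key))
termination_by l => l.length
decreasing_by simpa using Nat.lt_succ_of_le (List.dropWhile_sublist _).length_le

def count_dinucleotides_alt (fastq : List (String × List (String × Int))) : List (String × Int) :=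
  let dinucleotides : List String :=
    PySem.List.sorted
      ((PySem.Dict.ofList fastq).values.flatMap (fun read =>
        (PySem.Dict.ofList read).keys.flatMap (fun seq =>
          (PySem.List.pyRange 0 (PySem.Str.len seq - 1) 1).map
            (fun i => String.ofList (PySem.List.slice seq.toList (some i) (some (i + 2)))))))
      (fun s => s)
  pvGroup dinucleotides

-- ===== PRECONDITION & SPEC =====
def Spec_count_dinucleotides (fastq : List (String × List (String × Int))) (out : List (String × Int)) : Prop := out = count_dinucleotides_alt fastq
instance (fastq : List (String × List (String × Int))) (out : List (String × Int)) : Decidable (Spec_count_dinucleotides fastq out) := by unfold Spec_count_dinucleotides; infer_instance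

-- ===== CLAIM (what is proved, stated in full; the proofs are below) =====
def Claim_equal_count_dinucleotides : Prop := ∀ (fastq : List (String × List (String × Int))), Dom_count_dinucleotides fastq → Spec_count_dinucleotides fastq (count_dinucleotides fastq)

-- ===== LEMMAS AND PROOFS =====

-- the good-key test as B's port spells it
def pvGood (k : String) : Bool :=
  k.toList.all (fun c => !(PySem.Str.isIn (String.ofList [c]) "YNWRBHVSKDMU"))

-- the common list of dinucleotide windows, spelled exactly as B gathers it
def pvDinucs (fastq : List (String × List (String × Int))) : List String :=
  (PySem.Dict.ofList fastq).values.flatMap (fun read =>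
    (PySem.Dict.ofList read).keys.flatMap (fun seq =>
      (PySem.List.pyRange 0 (PySem.Str.len seq - 1) 1).map
        (fun i => String.ofList (PySem.List.slice seq.toList (some i) (some (i + 2))))))

-- A's collection loop produces pvDinucs
lemma pv_collectA (fastq : List (String × List (String × Int))) :
    (PySem.Dict.ofList fastq).values.foldl (fun acc read =>
      (PySem.Dict.ofList read).keys.foldl (fun acc sequence =>
        (PySem.List.pyRange 0 (PySem.Str.len sequence - 1) 1).foldl (fun acc i =>
          acc ++ [String.ofList (PySem.List.slice sequence.toList (some i) (some (i + 2)))]) acc) acc) []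
    = pvDinucs fastq := by
  simp only [PySem.List.foldl_append_singleton_eq_map, PySem.List.foldl_append_eq_flatMap]
  simp [pvDinucs]

-- A's blacklist test is the negation of B's good-key test, on every string
lemma pv_bad_eq (k : String) :
    (["Y","N","W","R","B","H","V","S","K","D","M","U"].any (fun n => PySem.Str.isIn n k))
    = !(pvGood k) := by
  have hsingle : ∀ (c : Char) (t : String), PySem.Str.isIn (String.ofList [c]) t = true ↔ c ∈ t.toList := by
    intro c t
    rw [PySem.Str.isIn_iff_infix]
    constructor
    · intro hinf
      have : c ∈ (String.ofList [c]).toList := by simp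
      exact hinf.mem this
    · intro hc
      rcases List.mem_iff_append.mp hc with ⟨u, v, huv⟩
      exact ⟨u, v, by simp [huv]⟩
  rw [Bool.eq_iff_iff]
  simp only [pvGood, Bool.not_eq_true', List.all_eq_false, Bool.not_eq_false, List.any_eq_true]
  constructor
  · rintro ⟨n, hn, hin⟩
    fin_cases hn <;>
      · rw [show PySem.Str.isIn _ k = PySem.Str.isIn (String.ofList [_]) k from rfl, hsingle] at hin
        exact ⟨_, hin, (hsingle _ _).mpr (by decide)⟩
  · rintro ⟨c, hc, hin⟩
    rw [hsingle] at hin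
    have : c ∈ ['Y','N','W','R','B','H','V','S','K','D','M','U'] := hin
    fin_cases this <;> exact ⟨_, by decide, (hsingle _ _).mpr hc⟩

-- A's deletion loop over the keys filters the items list
lemma pv_items_foldl_erase {κ ν : Type} [BEq κ] [LawfulBEq κ] (P : κ → Bool) (ks : List κ) (c : PySem.Dict κ ν) :
    (ks.foldl (fun c k => if P k then c.erase k else c) c).items
    = c.items.filter (fun p => !(P p.1 && ks.contains p.1)) := by
  induction ks generalizing c with
  | nil => simp
  | cons k ks ih =>
    simp only [List.foldl_cons]
    by_cases hP : P k
    · rw [if_pos hP, ih, PySem.Dict.erase]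
      show List.filter _ (List.filter _ c.items) = _
      rw [List.filter_filter]
      apply List.filter_congr
      intro p _
      by_cases hpk : p.1 = k
      · subst hpk; simp [hP]
      · simp [hpk]
    · rw [if_neg hP, ih]
      apply List.filter_congr
      intro p _
      by_cases hpk : p.1 = k
      · subst hpk; simp [hP]
      · simp [hpk]

lemma pv_insertBy_congr {α : Type} (f g : α → α → Bool) (x : α) (acc : List α)
    (h : ∀ b ∈ acc, f x b = g x b) :
    PySem.List.insertBy f x acc = PySem.List.insertBy g x acc := by
  induction acc with
  | nil => rfl
  | cons y ys ih =>
    have hy := h y (by simp)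
    simp only [PySem.List.insertBy, hy]
    split
    · rfl
    · simp only [List.cons.injEq, true_and]
      exact ih (fun b hb => h b (by simp [hb]))

lemma pv_foldl_insertBy_congr {α : Type} (f g : α → α → Bool) (xs : List α) (acc : List α)
    (h : ∀ a ∈ xs, ∀ b, b ∈ acc ∨ b ∈ xs → f a b = g a b) :
    xs.foldl (fun acc x => PySem.List.insertBy f x acc) acc
    = xs.foldl (fun acc x => PySem.List.insertBy g x acc) acc := by
  induction xs generalizing acc with
  | nil => rfl
  | cons x xs ih =>
    simp only [List.foldl_cons]
    rw [pv_insertBy_congr f g x acc (fun b hb => h x (by simp) b (Or.inl hb))]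
    exact ih (PySem.List.insertBy g x acc) (fun a ha b hb => by
      rcases hb with hb | hb
      · rcases (PySem.List.mem_insertBy g x b acc).mp hb with rfl | hb
        · exact h a (by simp [ha]) b (Or.inr (by simp))
        · exact h a (by simp [ha]) b (Or.inl hb)
      · exact h a (by simp [ha]) b (Or.inr (by simp [hb])))

-- Python's sorted(items) (tuple order) sorts by the first component alone when those are distinct
lemma pv_sorted2_eq_sorted {α κ₁ κ₂ : Type} [LinearOrder κ₁] [LinearOrder κ₂]
    (xs : List α) (k1 : α → κ₁) (k2 : α → κ₂) (h : (xs.map k1).Nodup) :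
    PySem.List.sorted2 xs k1 k2 = PySem.List.sorted xs k1 := by
  show xs.foldl _ _ = xs.foldl _ _
  apply pv_foldl_insertBy_congr
  intro a ha b hb
  rcases hb with hb | hb
  · simp at hb
  · by_cases hlt : k1 a < k1 b
    · simp [hlt]
    · by_cases hgt : k1 b < k1 a
      · simp [hlt, hgt]
      · have heq : k1 a = k1 b := le_antisymm (not_lt.mp hgt) (not_lt.mp hlt)
        have hab : a = b := List.inj_on_of_nodup_map h ha hb heq
        subst hab
        simp

lemma pv_foldl_add_sublist {α : Type} [BEq α] (xs acc : List α) :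
    (xs.foldl PySem.Set.add acc).Sublist (acc ++ xs) := by
  induction xs generalizing acc with
  | nil => simp
  | cons x xs ih =>
    simp only [List.foldl_cons]
    refine (ih (PySem.Set.add acc x)).trans ?_
    have h1 : (PySem.Set.add acc x).Sublist (acc ++ [x]) := by
      rw [PySem.Set.add]
      split
      · exact List.sublist_append_left acc [x]
      · exact List.Sublist.refl _
    simpa using h1.append_right xs

lemma pv_ofList_sublist {α : Type} [BEq α] (xs : List α) :
    (PySem.Set.ofList xs).Sublist xs := by
  rw [PySem.Set.ofList_eq_foldl]
  simpa using pv_foldl_add_sublist xs []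

lemma pv_items_ofList_of_nodup {κ ν : Type} [BEq κ] [LawfulBEq κ] (l : List (κ × ν))
    (h : (l.map Prod.fst).Nodup) : (PySem.Dict.ofList l).items = l := by
  rw [PySem.Dict.ofList, PySem.Dict.update]
  rw [PySem.Dict.items_foldl_insert_fresh l Prod.fst Prod.snd PySem.Dict.empty
    (fun a _ => PySem.Dict.contains_empty a.1) h]
  simp [PySem.Dict.empty]

-- dedup of a leading run: the head swallows its copies when it occurs nowhere later
lemma pv_ofList_run (x : String) (run t : List String)
    (hr : ∀ y ∈ run, y = x) (ht : x ∉ t) :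
    PySem.Set.ofList (x :: (run ++ t)) = x :: PySem.Set.ofList t := by
  have hfil : List.filter (fun z => !(z == x)) (PySem.Set.ofList t) = PySem.Set.ofList t :=
    List.filter_eq_self.mpr (fun z hz => by
      have hzt : z ∈ t := (PySem.Set.mem_ofList t z).mp hz
      simp only [Bool.not_eq_eq_eq_not, Bool.not_true, beq_eq_false_iff_ne]
      exact fun h => ht (h ▸ hzt))
  induction run with
  | nil =>
    rw [List.nil_append, PySem.Set.ofList_cons, PySem.Set.discard, hfil]
  | cons y run' ih =>
    have hyx : y = x := hr y (by simp)
    subst hyx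
    have ih' := ih (fun z hz => hr z (by simp [hz]))
    rw [List.cons_append, PySem.Set.ofList_cons, ih', PySem.Set.discard, List.filter_cons]
    simp [hfil]

-- the groupby scan of a sorted list is Counter-of-the-good-keys in first-occurrence order
lemma pv_group_eq (S : List String) (hS : S.Pairwise (· ≤ ·)) :
    pvGroup S
    = (PySem.Set.ofList (S.filter pvGood)).map
        (fun k => (k, ((S.filter pvGood).count k : Int))) := by
  induction S using pvGroup.induct with
  | case1 => simp [pvGroup]
  | case2 x xs ih =>
    rw [pvGroup]
    set run := xs.takeWhile (fun y => y == x) with hrun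
    set rest := xs.dropWhile (fun y => y == x) with hrest
    have hxs : run ++ rest = xs := List.takeWhile_append_dropWhile
    have hrunx : ∀ y ∈ run, y = x := fun y hy => by
      have := List.mem_takeWhile_imp hy
      exact eq_of_beq this
    have hxle : ∀ y ∈ xs, x ≤ y := fun y hy => List.rel_of_pairwise_cons hS hy
    have hrestlt : ∀ y ∈ rest, x < y := by
      intro y hy
      rcases hr : rest with _ | ⟨h, t'⟩
      · rw [hr] at hy; simp at hy
      · have hhx : (h == x) = false := by
          have := List.head_dropWhile_not (fun y => y == x) (l := xs) (by rw [← hrest, hr]; simp)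
          simpa [← hrest, hr] using this
        have hhne : h ≠ x := by simpa using hhx
        have hhmem : h ∈ xs := (List.dropWhile_sublist _).mem (by rw [← hrest, hr]; simp)
        have hxh : x < h := lt_of_le_of_ne (hxle h hhmem) (Ne.symm hhne)
        have hpw : rest.Pairwise (· ≤ ·) :=
          List.Pairwise.sublist (List.dropWhile_sublist _) (List.Pairwise.of_cons hS)
        rw [hr] at hy
        rcases List.mem_cons.mp hy with rfl | hy'
        · exact hxh
        · have : h ≤ y := by
            have := hpw; rw [hr] at this
            exact List.rel_of_pairwise_cons this hy'
          exact lt_of_lt_of_le hxh this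
    have hxnr : x ∉ rest := fun hx => lt_irrefl x (hrestlt x hx)
    have hpwrest : rest.Pairwise (· ≤ ·) :=
      List.Pairwise.sublist (List.dropWhile_sublist _) (List.Pairwise.of_cons hS)
    have ih' := ih hpwrest
    have hgfold : (x.toList.all fun c => !PySem.Str.isIn (String.ofList [c]) "YNWRBHVSKDMU") = pvGood x := rfl
    rw [hgfold]
    set R := rest.filter pvGood with hR
    have hxnR : x ∉ R := fun hx => hxnr (List.mem_of_mem_filter hx)
    have hfilter : (x :: xs).filter pvGood
        = (if pvGood x then x :: run else []) ++ R := by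
      rw [← hxs, ← List.cons_append, List.filter_append, hR]
      congr 1
      by_cases hg : pvGood x
      · rw [if_pos hg, List.filter_eq_self.mpr]
        intro y hy
        rcases List.mem_cons.mp hy with rfl | hy'
        · exact hg
        · rw [hrunx y hy']; exact hg
      · rw [if_neg hg, List.filter_eq_nil_iff.mpr]
        intro y hy
        rcases List.mem_cons.mp hy with rfl | hy'
        · simpa using hg
        · rw [hrunx y hy']; simpa using hg
    by_cases hg : pvGood x
    · rw [if_pos hg, hfilter, if_pos hg, ih']
      rw [show x :: run ++ R = x :: (run ++ R) from rfl]
      rw [pv_ofList_run x run R hrunx hxnR]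
      rw [List.map_cons, List.singleton_append]
      congr 1
      · -- head pair: count of x is 1 + run.length
        have hcx : (x :: (run ++ R)).count x = 1 + run.length := by
          rw [List.count_cons_self, List.count_append,
            List.count_eq_zero.mpr hxnR,
            List.count_eq_length.mpr (fun y hy => ((hrunx y hy).symm : x = y))]
          omega
        rw [hcx]
        norm_cast
      · -- tail pairs: counts of keys ≠ x are untouched by the run
        apply List.map_congr_left
        intro k hk
        have hkR : k ∈ R := (PySem.Set.mem_ofList R k).mp hk
        have hkx : k ≠ x := by
          intro h; exact hxnR (h ▸ hkR)
        have h0 : run.count k = 0 :=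
          List.count_eq_zero.mpr (fun hkrun => hkx (hrunx k hkrun))
        have : (x :: (run ++ R)).count k = R.count k := by
          simp [List.count_append, h0, Ne.symm hkx]
        rw [this]
    · rw [if_neg hg, List.nil_append, hfilter, if_neg hg, List.nil_append, ih']

-- ===== VERDICT (by name: the statement is the Claim_ definition above) =====
theorem count_dinucleotides_spec : Claim_equal_count_dinucleotides := by
  intro fastq _
  show count_dinucleotides fastq = count_dinucleotides_alt fastq
  simp only [count_dinucleotides, count_dinucleotides_alt]
  rw [pv_collectA]
  rw [show ((PySem.Dict.ofList fastq).values.flatMap (fun read =>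
        (PySem.Dict.ofList read).keys.flatMap (fun seq =>
          (PySem.List.pyRange 0 (PySem.Str.len seq - 1) 1).map
            (fun i => String.ofList (PySem.List.slice seq.toList (some i) (some (i + 2))))))) = pvDinucs fastq from rfl]
  set D := pvDinucs fastq with hD
  set S : List String := PySem.List.sorted D (fun s => s) with hS
  set f : String → String × Int := fun k => (k, (D.count k : Int)) with hf
  -- B side: the groupby scan of the sorted list
  rw [pv_group_eq S (PySem.List.sorted_pairwise D (fun s => s))]
  -- A side: the deletion loop filters Counter's items down to the good keys
  rw [pv_items_foldl_erase, PySem.Dict.keys_counter]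
  have hfilt : (PySem.Dict.counter D).items.filter
        (fun p => !(((["Y","N","W","R","B","H","V","S","K","D","M","U"] : List String).any
            (fun n => PySem.Str.isIn n p.1)) && List.contains (PySem.Set.ofList D) p.1))
      = (PySem.Dict.counter D).items.filter (fun p => pvGood p.1) := by
    apply List.filter_congr
    intro p hp
    have hk : p.1 ∈ (PySem.Dict.counter D).keys := PySem.Dict.mem_keys_of_mem_items _ hp
    rw [PySem.Dict.keys_counter] at hk
    have hc : List.contains (PySem.Set.ofList D) p.1 = true := List.contains_iff_mem.mpr hk
    rw [hc, pv_bad_eq]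
    simp
  rw [hfilt, PySem.Dict.items_counter, List.filter_map]
  have hcomp : ((fun p : String × Int => pvGood p.1) ∘ (fun k => (k, (D.count k : Int)))) = pvGood := rfl
  rw [hcomp]
  set K : List String := (PySem.Set.ofList D).filter pvGood with hK
  have hKnodup : K.Nodup := (PySem.Set.nodup_ofList D).filter pvGood
  have hmapfst : (K.map f).map Prod.fst = K := by
    rw [List.map_map]; exact List.map_id K
  rw [show (K.map (fun k => (k, (D.count k : Int)))) = K.map f from rfl]
  rw [pv_sorted2_eq_sorted (K.map f) (fun p => p.1) (fun p => p.2)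
    (by rw [show ((K.map f).map (fun p : String × Int => p.1)) = (K.map f).map Prod.fst from rfl, hmapfst]; exact hKnodup)]
  -- name B's final list: the sorted A-side list is exactly it
  set fs : List String := S.filter pvGood with hfs
  set N : List (String × Int) := (PySem.Set.ofList fs).map (fun k => (k, (fs.count k : Int))) with hN
  have hmemfs : ∀ x, x ∈ fs ↔ x ∈ D ∧ pvGood x = true := by
    intro x
    rw [hfs, List.mem_filter, hS, PySem.List.mem_sorted]
  have hcount : ∀ k ∈ PySem.Set.ofList fs, fs.count k = D.count k := by
    intro k hk
    have hkfs : k ∈ fs := (PySem.Set.mem_ofList fs k).mp hk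
    have hGk : pvGood k = true := ((hmemfs k).mp hkfs).2
    rw [hfs, List.count_filter hGk, hS]
    exact (PySem.List.sorted_perm D (fun s => s) false).count_eq k
  have hperm : N.Perm (K.map f) := by
    have h1 : (PySem.Set.ofList fs).Perm K := by
      rw [List.perm_ext_iff_of_nodup (PySem.Set.nodup_ofList fs) hKnodup]
      intro a
      rw [PySem.Set.mem_ofList, hmemfs, hK, List.mem_filter, PySem.Set.mem_ofList]
    have h2 : N = (PySem.Set.ofList fs).map f := by
      rw [hN]
      exact List.map_congr_left (fun k hk => by rw [hf, hcount k hk])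
    rw [h2]
    exact h1.map f
  have hpair : N.Pairwise (fun a b => a.1 < b.1) := by
    rw [hN, List.pairwise_map]
    have hle : fs.Pairwise (· ≤ ·) := by
      rw [hfs, hS]
      exact (PySem.List.sorted_pairwise D (fun s => s)).filter pvGood
    have hle' : (PySem.Set.ofList fs).Pairwise (· ≤ ·) :=
      List.Pairwise.sublist (pv_ofList_sublist fs) hle
    have hne : (PySem.Set.ofList fs).Pairwise (· ≠ ·) := PySem.Set.nodup_ofList fs
    exact (hle'.and hne).imp (fun h => lt_of_le_of_ne h.1 h.2)
  rw [PySem.List.sorted_eq_of_perm_of_pairwise_lt (K.map f) N (fun p => p.1) hperm hpair]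
  rw [pv_items_ofList_of_nodup N (by
    rw [hN, List.map_map]
    have : ((Prod.fst ∘ fun k => (k, (fs.count k : Int)))) = id := rfl
    rw [this, List.map_id]
    exact PySem.Set.nodup_ofList fs)]
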